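-- pv_equiv track=rewrite | github.com/bentman/JARVISv7 | scripts/validate_backend.py | _combine_codes
-- ===== SOURCE A (Python) =====
-- def _combine_codes(codes: list[int]) -> int:
--     if any(code == 3 for code in codes):
--         return 3
--     if any(code == 1 for code in codes):
--         return 1
--     if any(code == 2 for code in codes):
--         return 2
--     return 0
-- ===== SOURCE B (Python) =====
-- _RANK = {3: 3, 1: 2, 2: 1}
-- _CODE_OF_RANK = {0: 0, 1: 2, 2: 1, 3: 3}
--
-- def _combine_codes(codes: list[int]) -> int:
--     best = 0
--     for code in codes:
--         r = _RANK.get(code, 0)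
--         if r > best:
--             best = r
--     return _CODE_OF_RANK[best]
-- ===== Notes on version B (the rewrite author's own statement) =====
-- stated objective: simpler
-- what changed: Replaced the three separate priority-ordered any-scans with a single pass keeping the maximum priority rank (3>1>2>0) via a rank table, mapping the best rank back to its code (one traversal instead of up to three).
import Mathlib
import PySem

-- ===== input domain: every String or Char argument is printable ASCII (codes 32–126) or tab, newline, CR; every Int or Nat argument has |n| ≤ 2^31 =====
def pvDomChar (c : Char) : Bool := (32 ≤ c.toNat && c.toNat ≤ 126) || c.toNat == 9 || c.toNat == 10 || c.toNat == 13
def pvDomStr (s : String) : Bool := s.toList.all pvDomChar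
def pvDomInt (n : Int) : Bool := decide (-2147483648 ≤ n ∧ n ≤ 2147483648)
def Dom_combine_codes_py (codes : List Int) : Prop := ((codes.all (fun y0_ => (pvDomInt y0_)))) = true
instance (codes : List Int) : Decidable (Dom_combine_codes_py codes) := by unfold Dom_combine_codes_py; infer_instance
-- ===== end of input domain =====

-- B: single pass over the codes keeping the maximum priority rank (3>1>2>0), then maps the best rank back to its code; objective: simpler.
-- ===== PORT A =====
def combine_codes_py (codes : List Int) : Int :=
  if codes.any (fun code => code == 3) then 3
  else if codes.any (fun code => code == 1) then 1
  else if codes.any (fun code => code == 2) then 2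
  else 0

-- ===== PORT B =====
-- _RANK.get(code, 0)
def pvRank (code : Int) : Int :=
  PySem.Dict.getD (PySem.Dict.ofList [((3 : Int), (3 : Int)), (1, 2), (2, 1)]) code 0

-- _CODE_OF_RANK[best]
def pvCodeOfRank (r : Int) : Int :=
  PySem.Dict.getD (PySem.Dict.ofList [((0 : Int), (0 : Int)), (1, 2), (2, 1), (3, 3)]) r 0

def combine_codes_py_alt (codes : List Int) : Int :=
  pvCodeOfRank (codes.foldl (fun best code =>
    let r := pvRank code
    if r > best then r else best) 0)

-- ===== PRECONDITION & SPEC =====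
def Spec_combine_codes_py (codes : List Int) (out : Int) : Prop := out = combine_codes_py_alt codes
instance (codes : List Int) (out : Int) : Decidable (Spec_combine_codes_py codes out) := by unfold Spec_combine_codes_py; infer_instance

-- ===== CLAIM (what is proved, stated in full; the proofs are below) =====
def Claim_equal_combine_codes_py : Prop := ∀ (codes : List Int), Dom_combine_codes_py codes → Spec_combine_codes_py codes (combine_codes_py codes)

-- ===== LEMMAS AND PROOFS =====

-- ===== VERDICT (by name: the statement is the Claim_ definition above) =====
lemma pvRank_eq (c : Int) :
    pvRank c = if c = 3 then 3 else if c = 1 then 2 else if c = 2 then 1 else 0 := by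
  have h : PySem.Dict.ofList [((3 : Int), (3 : Int)), (1, 2), (2, 1)]
      = PySem.Dict.mk [((3 : Int), (3 : Int)), (1, 2), (2, 1)] := by decide
  simp only [pvRank, PySem.Dict.getD, h, PySem.Dict.get?_mk_cons]
  split_ifs <;> simp_all [PySem.Dict.get?] <;> omega

-- foldl with a larger accumulator: peel off the accumulator
lemma pv_fold_acc (codes : List Int) (acc : Int) (hacc : 0 ≤ acc) :
    codes.foldl (fun best code => let r := pvRank code; if r > best then r else best) acc
      = max acc (codes.foldl (fun best code => let r := pvRank code; if r > best then r else best) 0) := by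
  induction codes generalizing acc with
  | nil => simpa using (Int.max_eq_left hacc).symm
  | cons c cs ih =>
    simp only [List.foldl_cons]
    have hr : (0 : Int) ≤ pvRank c := by rw [pvRank_eq]; split_ifs <;> omega
    rw [ih _ (by split_ifs <;> omega), ih (if pvRank c > 0 then pvRank c else 0) (by split_ifs <;> omega)]
    split_ifs <;> omega

-- the fold computes the rank of A's result
lemma pv_fold_rankA (codes : List Int) :
    codes.foldl (fun best code => let r := pvRank code; if r > best then r else best) 0
      = (if codes.any (fun code => code == 3) then 3
         else if codes.any (fun code => code == 1) then 2
         else if codes.any (fun code => code == 2) then 1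
         else 0) := by
  induction codes with
  | nil => simp
  | cons c cs ih =>
    simp only [List.foldl_cons, List.any_cons]
    rw [pv_fold_acc _ _ (by rw [pvRank_eq]; split_ifs <;> omega), ih]
    rw [pvRank_eq]
    by_cases h3 : c = 3 <;> by_cases h1 : c = 1 <;> by_cases h2 : c = 2 <;>
      simp_all <;> split_ifs <;> simp_all <;> omega

theorem combine_codes_py_spec : Claim_equal_combine_codes_py := by
  intro codes _
  show _ = _
  rw [combine_codes_py_alt, pv_fold_rankA, combine_codes_py]
  split_ifs <;> decide
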